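-- pv_equiv track=rewrite | github.com/HamInRam/AdventOfCode2024 | day2_p2.py | safeWithErrorCnt
-- ===== SOURCE A (Python) =====
-- def safeWithNoErrorCnt(numbers):
--     increasing = all(x < y and 1<=abs(x-y)<=3 for x, y in zip(numbers, numbers[1:]))
--     decreasing = all(x > y and 1<=abs(x-y)<=3 for x, y in zip(numbers, numbers[1:]))
--
--     return increasing or decreasing
--
-- def safeWithErrorCnt(numbers):
--     if safeWithNoErrorCnt(numbers):
--         return True
--
--     for i in range(len(numbers)):
--         temp = numbers[:i] + numbers[i + 1:]
--         if safeWithNoErrorCnt(temp):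
--             return True
--
--     return False
-- ===== SOURCE B (Python) =====
-- def _mono(xs, d):
--     return all(1 <= d * (y - x) <= 3 for x, y in zip(xs, xs[1:]))
--
-- def _tol(xs, d):
--     for i, (x, y) in enumerate(zip(xs, xs[1:])):
--         if not (1 <= d * (y - x) <= 3):
--             return _mono(xs[:i] + xs[i + 1:], d) or _mono(xs[:i + 1] + xs[i + 2:], d)
--     return True
--
-- def safeWithErrorCnt(numbers):
--     return _tol(numbers, 1) or _tol(numbers, -1)
-- ===== Notes on version B (the rewrite author's own statement) =====
-- stated objective: faster
-- what changed: Instead of retrying the full monotonicity check after removing every index (quadratic), B scans each direction once, finds the first adjacent pair violating it and only tests removing that pair's two endpoints.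
import Mathlib
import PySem

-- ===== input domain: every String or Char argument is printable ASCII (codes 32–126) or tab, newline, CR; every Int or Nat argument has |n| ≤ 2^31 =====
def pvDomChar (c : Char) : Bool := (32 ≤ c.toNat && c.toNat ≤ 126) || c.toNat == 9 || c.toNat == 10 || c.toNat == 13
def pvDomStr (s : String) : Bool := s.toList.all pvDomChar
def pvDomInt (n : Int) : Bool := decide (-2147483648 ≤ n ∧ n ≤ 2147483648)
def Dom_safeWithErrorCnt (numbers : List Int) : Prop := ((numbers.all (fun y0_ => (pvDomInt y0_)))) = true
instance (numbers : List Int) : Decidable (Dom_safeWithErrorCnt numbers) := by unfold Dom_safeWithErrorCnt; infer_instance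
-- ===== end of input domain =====

-- B replaces A's quadratic try-every-removal loop by one linear scan per direction:
-- it finds the first adjacent pair violating the direction and only tries removing
-- that pair's two endpoints (objective: faster, asymptotic O(n) vs O(n^2)).

-- ===== PORT A =====
-- zip(numbers, numbers[1:]) = numbers.zip (numbers.drop 1)  (slice [1:] with nonnegative start is drop 1, exact)
def safeWithNoErrorCnt (numbers : List Int) : Bool :=
  let increasing := (numbers.zip (numbers.drop 1)).all fun p =>
    decide (p.1 < p.2) && (decide (1 ≤ |p.1 - p.2|) && decide (|p.1 - p.2| ≤ 3))
  let decreasing := (numbers.zip (numbers.drop 1)).all fun p =>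
    decide (p.1 > p.2) && (decide (1 ≤ |p.1 - p.2|) && decide (|p.1 - p.2| ≤ 3))
  increasing || decreasing

-- the for-loop with early 'return True' is List.any over range(len(numbers));
-- numbers[:i] + numbers[i+1:] with i a nonnegative in-range index is take i ++ drop (i+1) (exact)
def safeWithErrorCnt (numbers : List Int) : Bool :=
  if safeWithNoErrorCnt numbers then true
  else (List.range numbers.length).any fun i =>
    safeWithNoErrorCnt (numbers.take i ++ numbers.drop (i + 1))

-- ===== PORT B =====
def pvGood (d x y : Int) : Bool := decide (1 ≤ d * (y - x)) && decide (d * (y - x) ≤ 3)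

def pvMono (xs : List Int) (d : Int) : Bool :=
  (xs.zip (xs.drop 1)).all fun p => pvGood d p.1 p.2

-- the for-loop over enumerate(zip(xs, xs[1:])) with early return at the first violation
def pvTolAux (xs : List Int) (d : Int) : List (Int × (Int × Int)) → Bool
  | [] => true
  | (i, (x, y)) :: rest =>
    if pvGood d x y then pvTolAux xs d rest
    else
      pvMono (PySem.List.slice xs none (some i) ++ PySem.List.slice xs (some (i + 1)) none) d
        || pvMono (PySem.List.slice xs none (some (i + 1)) ++ PySem.List.slice xs (some (i + 2)) none) d

def pvTol (xs : List Int) (d : Int) : Bool :=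
  pvTolAux xs d (PySem.List.enumerate (xs.zip (xs.drop 1)) 0)

def safeWithErrorCnt_alt (numbers : List Int) : Bool :=
  pvTol numbers 1 || pvTol numbers (-1)

-- ===== PRECONDITION & SPEC =====
def Spec_safeWithErrorCnt (numbers : List Int) (out : Bool) : Prop := out = safeWithErrorCnt_alt numbers
instance (numbers : List Int) (out : Bool) : Decidable (Spec_safeWithErrorCnt numbers out) := by unfold Spec_safeWithErrorCnt; infer_instance

-- ===== CLAIM (what is proved, stated in full; the proofs are below) =====
def Claim_equal_safeWithErrorCnt : Prop := ∀ (numbers : List Int), Dom_safeWithErrorCnt numbers → Spec_safeWithErrorCnt numbers (safeWithErrorCnt numbers)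

-- ===== LEMMAS AND PROOFS =====

-- `xs` with index j removed
def pvRm (xs : List Int) (j : Nat) : List Int := xs.take j ++ xs.drop (j + 1)

-- characterisation of pvMono by adjacent pairs
theorem pvMono_iff (xs : List Int) (d : Int) :
    pvMono xs d = true ↔ ∀ k, (h : k + 1 < xs.length) → pvGood d xs[k] xs[k+1] = true := by
  unfold pvMono
  rw [List.all_eq_true]
  constructor
  · intro H k h
    have hk : k < (xs.zip (xs.drop 1)).length := by
      simp [List.length_zip]; omega
    have := H (xs.zip (xs.drop 1))[k] (by exact List.getElem_mem hk)
    simpa [List.getElem_zip, List.getElem_drop] using this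
  · intro H p hp
    rcases List.mem_iff_getElem.mp hp with ⟨k, hk, rfl⟩
    have hk' : k + 1 < xs.length := by
      simp [List.length_zip] at hk; omega
    simpa [List.getElem_zip, List.getElem_drop] using H k hk'

theorem length_pvRm (xs : List Int) (j : Nat) (hj : j < xs.length) :
    (pvRm xs j).length = xs.length - 1 := by
  simp [pvRm, List.length_take, List.length_drop]; omega

theorem getElem_pvRm_lt (xs : List Int) (j m : Nat) (hm : m < j)
    (h : m < (pvRm xs j).length) : (pvRm xs j)[m] = xs[m]'(by
      simp [pvRm, List.length_take, List.length_drop] at h; omega) := by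
  have hx : m < xs.length := by
    simp [pvRm, List.length_take, List.length_drop] at h; omega
  simp [pvRm, List.getElem_take, hm, hx]

theorem getElem_pvRm_ge (xs : List Int) (j m : Nat) (hm : j ≤ m)
    (h : m < (pvRm xs j).length) : (pvRm xs j)[m] = xs[m + 1]'(by
      simp [pvRm, List.length_take, List.length_drop] at h; omega) := by
  have hlen : j < xs.length := by
    simp [pvRm, List.length_take, List.length_drop] at h; omega
  have htl : (xs.take j).length = j := by simp; omega
  have hmt : ¬ m < (xs.take j).length := by omega
  simp only [pvRm] at h ⊢
  rw [List.getElem_append]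
  rw [dif_neg hmt]
  rw [List.getElem_drop]
  congr 1
  simp at h ⊢
  omega

-- the brute-force proposition, per direction
def pvBrute (xs : List Int) (d : Int) : Prop :=
  pvMono xs d = true ∨ ∃ k, k < xs.length ∧ pvMono (pvRm xs k) d = true

-- A's pair predicates agree with pvGood at d = 1 and d = -1
theorem pvGood_one (x y : Int) :
    (decide (x < y) && (decide (1 ≤ |x - y|) && decide (|x - y| ≤ 3))) = pvGood 1 x y := by
  simp only [pvGood, one_mul]
  rcases abs_cases (x - y) with ⟨h1, h2⟩ | ⟨h1, h2⟩ <;>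
    simp only [h1] <;> by_cases h : x < y <;> simp [h] <;> omega

theorem pvGood_neg_one (x y : Int) :
    (decide (x > y) && (decide (1 ≤ |x - y|) && decide (|x - y| ≤ 3))) = pvGood (-1) x y := by
  simp only [pvGood, neg_one_mul, neg_sub]
  rcases abs_cases (x - y) with ⟨h1, h2⟩ | ⟨h1, h2⟩ <;>
    simp only [h1] <;> by_cases h : x > y <;> simp [h] <;> omega

theorem safeWithNoErrorCnt_eq (xs : List Int) :
    safeWithNoErrorCnt xs = (pvMono xs 1 || pvMono xs (-1)) := by
  have e1 : (fun p : Int × Int => decide (p.1 < p.2) && (decide (1 ≤ |p.1 - p.2|) && decide (|p.1 - p.2| ≤ 3)))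
      = fun p : Int × Int => pvGood 1 p.1 p.2 := funext fun p => pvGood_one p.1 p.2
  have e2 : (fun p : Int × Int => decide (p.1 > p.2) && (decide (1 ≤ |p.1 - p.2|) && decide (|p.1 - p.2| ≤ 3)))
      = fun p : Int × Int => pvGood (-1) p.1 p.2 := funext fun p => pvGood_neg_one p.1 p.2
  simp only [safeWithNoErrorCnt, pvMono, e1, e2]

-- A equals the per-direction brute force
theorem safeA_iff (xs : List Int) :
    safeWithErrorCnt xs = true ↔ pvBrute xs 1 ∨ pvBrute xs (-1) := by
  unfold safeWithErrorCnt pvBrute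
  by_cases h : safeWithNoErrorCnt xs = true
  · rw [if_pos h]
    rw [safeWithNoErrorCnt_eq] at h
    have h' : pvMono xs 1 = true ∨ pvMono xs (-1) = true := by simpa using h
    constructor
    · intro _
      rcases h' with h1 | h1
      · exact Or.inl (Or.inl h1)
      · exact Or.inr (Or.inl h1)
    · intro _; rfl
  · rw [if_neg h]
    rw [safeWithNoErrorCnt_eq] at h
    have h1 : ¬ pvMono xs 1 = true := fun hc => h (by simp [hc])
    have h2 : ¬ pvMono xs (-1) = true := fun hc => h (by simp [hc])
    simp only [List.any_eq_true, List.mem_range, safeWithNoErrorCnt_eq, Bool.or_eq_true]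
    constructor
    · rintro ⟨k, hk, hc | hc⟩
      · exact Or.inl (Or.inr ⟨k, hk, hc⟩)
      · exact Or.inr (Or.inr ⟨k, hk, hc⟩)
    · rintro (hb | hb) <;> rcases hb with hm | ⟨k, hk, hc⟩
      · exact absurd hm h1
      · exact ⟨k, hk, Or.inl hc⟩
      · exact absurd hm h2
      · exact ⟨k, hk, Or.inr hc⟩

-- pvTolAux on an enumerated pair list is a find-first
theorem pvTolAux_enum (xs : List Int) (d : Int) (l : List (Int × Int)) :
    ∀ s : Nat, pvTolAux xs d (PySem.List.enumerate l (s : Int)) =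
      match l.findIdx? (fun p => !pvGood d p.1 p.2) with
      | none => true
      | some k => pvMono (pvRm xs (s + k)) d || pvMono (pvRm xs (s + k + 1)) d := by
  induction l with
  | nil => intro s; simp [PySem.List.enumerate_nil, pvTolAux]
  | cons p t ih =>
    intro s
    obtain ⟨x, y⟩ := p
    rw [PySem.List.enumerate_cons, List.findIdx?_cons]
    show (if pvGood d x y then _ else _) = _
    by_cases hg : pvGood d x y = true
    · have hc : ((s : Int) + 1) = ((s + 1 : Nat) : Int) := by push_cast; ring
      rw [if_pos hg, hc, ih (s + 1)]
      have hift : (if (!pvGood d x y) = true then some 0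
            else Option.map (fun i => i + 1) (List.findIdx? (fun p => !pvGood d p.1 p.2) t))
          = Option.map (fun i => i + 1) (List.findIdx? (fun p => !pvGood d p.1 p.2) t) := by
        rw [if_neg]; simp [hg]
      rw [hift]
      cases hfi : t.findIdx? (fun p => !pvGood d p.1 p.2) with
      | none => simp
      | some k =>
        simp only [Option.map_some]
        have e1 : s + 1 + k = s + (k + 1) := by omega
        rw [e1]
    · rw [if_neg hg]
      simp only [hg, Bool.not_false]
      have c1 : PySem.List.slice xs none (some (s : Int)) = xs.take s :=
        PySem.List.slice_to_natCast xs s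
      have c2 : PySem.List.slice xs (some ((s : Int) + 1)) none = xs.drop (s + 1) := by
        have : ((s : Int) + 1) = ((s + 1 : Nat) : Int) := by push_cast; ring
        rw [this]; exact PySem.List.slice_from_natCast xs (s + 1)
      have c3 : PySem.List.slice xs none (some ((s : Int) + 1)) = xs.take (s + 1) := by
        have : ((s : Int) + 1) = ((s + 1 : Nat) : Int) := by push_cast; ring
        rw [this]; exact PySem.List.slice_to_natCast xs (s + 1)
      have c4 : PySem.List.slice xs (some ((s : Int) + 2)) none = xs.drop (s + 2) := by
        have : ((s : Int) + 2) = ((s + 2 : Nat) : Int) := by push_cast; ring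
        rw [this]; exact PySem.List.slice_from_natCast xs (s + 2)
      simp only [c1, c2, c3, c4, pvRm]
      norm_num

-- if some pair of xs is bad, a removal away from it leaves that pair adjacent
theorem not_mono_rm (xs : List Int) (d : Int) (k j : Nat)
    (hk : k + 1 < xs.length) (hbad : ¬ pvGood d xs[k] xs[k+1] = true)
    (hj : j < xs.length) (hne : j ≠ k ∧ j ≠ k + 1) :
    ¬ pvMono (pvRm xs j) d = true := by
  intro hm
  rw [pvMono_iff] at hm
  rcases Nat.lt_or_ge j k with hjk | hjk
  · -- j < k : in pvRm xs j the pair sits at positions (k-1, k)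
    have hlen : (pvRm xs j).length = xs.length - 1 := length_pvRm xs j hj
    have hpos : (k - 1) + 1 < (pvRm xs j).length := by omega
    have := hm (k - 1) hpos
    have e1 : (pvRm xs j)[k-1]'(by omega) = xs[k]'(by omega) := by
      rw [getElem_pvRm_ge xs j (k-1) (by omega) (by omega)]
      congr 1; omega
    have e2 : (pvRm xs j)[(k-1)+1]'(by omega) = xs[k+1]'(by omega) := by
      rw [getElem_pvRm_ge xs j ((k-1)+1) (by omega) (by omega)]
      congr 1; omega
    rw [e1, e2] at this
    exact hbad this
  · -- j > k + 1 : the pair stays at positions (k, k+1)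
    have hjk' : k + 1 < j := by omega
    have hlen : (pvRm xs j).length = xs.length - 1 := length_pvRm xs j hj
    have hpos : k + 1 < (pvRm xs j).length := by omega
    have := hm k hpos
    have e1 : (pvRm xs j)[k]'(by omega) = xs[k]'(by omega) :=
      getElem_pvRm_lt xs j k (by omega) (by omega)
    have e2 : (pvRm xs j)[k+1]'(by omega) = xs[k+1]'(by omega) :=
      getElem_pvRm_lt xs j (k+1) (by omega) (by omega)
    rw [e1, e2] at this
    exact hbad this

-- per direction: the linear scan equals the brute force
theorem pvTol_iff (xs : List Int) (d : Int) :
    pvTol xs d = true ↔ pvBrute xs d := by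
  unfold pvTol
  have h0 : ((0 : Int)) = ((0 : Nat) : Int) := by norm_num
  rw [h0, pvTolAux_enum xs d (xs.zip (xs.drop 1)) 0]
  cases hfi : (xs.zip (xs.drop 1)).findIdx? (fun p => !pvGood d p.1 p.2) with
  | none =>
    -- no violation: xs itself is monotone
    rw [List.findIdx?_eq_none_iff] at hfi
    have hmono : pvMono xs d = true := by
      unfold pvMono
      rw [List.all_eq_true]
      intro p hp
      have := hfi p hp
      simpa using this
    constructor
    · intro _; exact Or.inl hmono
    · intro _; trivial
  | some k =>
    rw [List.findIdx?_eq_some_iff_getElem] at hfi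
    obtain ⟨hklen, hpk, hfirst⟩ := hfi
    have hk1 : k + 1 < xs.length := by
      simp [List.length_zip] at hklen; omega
    have hbad : ¬ pvGood d xs[k] xs[k+1] = true := by
      simp only [List.getElem_zip, List.getElem_drop] at hpk
      simp only [Bool.not_eq_true'] at hpk
      simp only [Nat.add_comm 1 k] at hpk
      simp [hpk]
    have hnm : ¬ pvMono xs d = true := by
      intro hm
      exact hbad ((pvMono_iff xs d).mp hm k hk1)
    simp only [Nat.zero_add, Bool.or_eq_true]
    constructor
    · rintro (h | h)
      · exact Or.inr ⟨k, by omega, h⟩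
      · exact Or.inr ⟨k + 1, by omega, h⟩
    · rintro (h | ⟨j, hj, hmj⟩)
      · exact absurd h hnm
      · by_cases hjk : j = k
        · subst hjk; exact Or.inl hmj
        · by_cases hjk1 : j = k + 1
          · subst hjk1; exact Or.inr hmj
          · exact absurd hmj (not_mono_rm xs d k j hk1 hbad hj ⟨hjk, hjk1⟩)

-- ===== VERDICT (by name: the statement is the Claim_ definition above) =====
theorem safeWithErrorCnt_spec : Claim_equal_safeWithErrorCnt := by
  intro numbers _
  unfold Spec_safeWithErrorCnt
  rw [Bool.eq_iff_iff]
  rw [safeA_iff]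
  unfold safeWithErrorCnt_alt
  rw [Bool.or_eq_true, pvTol_iff, pvTol_iff]
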